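-- pv_equiv track=rewrite | github.com/tlclay/TB-FAQ | utilities/tbfaq_utilities.py | isnotWS
-- ===== SOURCE A (Python) =====
-- def isnotWS(s):
--     l = len(s)
--     i = 0
--     while i < l:
--         if not s[i] in " \t\n":
--             return True
--         i+=1
--     return False
-- ===== SOURCE B (Python) =====
-- def isnotWS(s):
--     return bool(s.strip(" \t\n"))
-- ===== Notes on version B (the rewrite author's own statement) =====
-- stated objective: simpler
-- what changed: Replaces the explicit index loop over characters with a single delegation to str.strip(" \t\n") followed by a truthiness test of the stripped string.
import Mathlib
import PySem

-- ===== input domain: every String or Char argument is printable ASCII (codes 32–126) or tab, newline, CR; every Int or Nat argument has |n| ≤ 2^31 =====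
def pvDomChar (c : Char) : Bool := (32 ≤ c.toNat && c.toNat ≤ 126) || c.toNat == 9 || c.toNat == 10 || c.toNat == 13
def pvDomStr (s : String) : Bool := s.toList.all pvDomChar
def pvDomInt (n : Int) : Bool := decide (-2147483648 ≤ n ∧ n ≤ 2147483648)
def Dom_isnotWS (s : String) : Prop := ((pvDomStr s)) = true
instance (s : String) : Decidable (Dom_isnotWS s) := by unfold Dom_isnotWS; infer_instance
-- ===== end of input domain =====

-- ===== PORT A =====
-- B replaces the index loop with str.strip(" \t\n") and a truthiness test (simpler).
def isnotWSLoop : List Char → Bool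
  | [] => false
  | c :: rest => if !((" \t\n".toList).contains c) then true else isnotWSLoop rest

def isnotWS (s : String) : Bool := isnotWSLoop s.toList

-- ===== PORT B =====
def isnotWS_alt (s : String) : Bool := PySem.Str.stripChars s " \t\n" != ""

-- ===== PRECONDITION & SPEC =====
def Spec_isnotWS (s : String) (out : Bool) : Prop := out = isnotWS_alt s
instance (s : String) (out : Bool) : Decidable (Spec_isnotWS s out) := by unfold Spec_isnotWS; infer_instance

-- ===== CLAIM (what is proved, stated in full; the proofs are below) =====
def Claim_equal_isnotWS : Prop := ∀ (s : String), Dom_isnotWS s → Spec_isnotWS s (isnotWS s)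

-- ===== LEMMAS AND PROOFS =====

-- ===== VERDICT (by name: the statement is the Claim_ definition above) =====
lemma loop_eq_any (cs : List Char) :
    isnotWSLoop cs = cs.any (fun c => !((" \t\n".toList).contains c)) := by
  induction cs with
  | nil => rfl
  | cons c rest ih =>
      simp only [isnotWSLoop, List.any_cons]
      cases hc : (!((" \t\n".toList).contains c)) with
      | true => simp only [if_true, Bool.true_or]
      | false =>
          rw [if_neg (by simp), ih, Bool.false_or]

lemma stripChars_eq_nil_iff (cs t : List Char) :
    PySem.Chars.stripChars cs t = [] ↔ ∀ x ∈ cs, t.contains x := by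
  show ((cs.dropWhile (fun c => t.contains c)).reverse.dropWhile
          (fun c => t.contains c)).reverse = [] ↔ _
  rw [List.reverse_eq_nil_iff, List.dropWhile_eq_nil_iff]
  simp only [List.mem_reverse]
  constructor
  · intro h x hx
    rcases (by rw [List.takeWhile_append_dropWhile] ; exact hx :
        x ∈ cs.takeWhile (fun c => t.contains c) ++
            cs.dropWhile (fun c => t.contains c)) |> List.mem_append.mp with h1 | h2
    · exact List.mem_takeWhile_imp h1
    · exact h x h2
  · intro h x hx
    exact h x (List.dropWhile_sublist _ |>.mem hx)

theorem isnotWS_spec : Claim_equal_isnotWS := by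
  intro s _
  unfold Spec_isnotWS isnotWS isnotWS_alt
  rw [loop_eq_any]
  have hlist : (PySem.Str.stripChars s " \t\n").toList =
      PySem.Chars.stripChars s.toList " \t\n".toList := PySem.Str.toList_stripChars ..
  by_cases h : ∀ x ∈ s.toList, (" \t\n".toList).contains x
  · have h0 : PySem.Str.stripChars s " \t\n" = "" := by
      have := (stripChars_eq_nil_iff s.toList " \t\n".toList).mpr h
      apply String.ext
      rw [hlist, this] ; rfl
    rw [h0]
    simp only [bne_self_eq_false, List.any_eq_false]
    intro x hx
    simp only [Bool.not_eq_true', Bool.not_eq_false]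
    exact h x hx
  · have h0 : PySem.Str.stripChars s " \t\n" ≠ "" := by
      intro he
      exact h ((stripChars_eq_nil_iff s.toList " \t\n".toList).mp
        (by rw [← hlist, he] ; rfl))
    have hb : (PySem.Str.stripChars s " \t\n" != "") = true := by
      simpa [bne_iff_ne] using h0
    rw [hb]
    push Not at h
    obtain ⟨x, hx, hxc⟩ := h
    rw [List.any_eq_true]
    refine ⟨x, hx, ?_⟩
    simpa using hxc
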